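-- pv_equiv track=rewrite | github.com/Mr-juhyun/study-algorithm | 프로그래머스/1/340198. ［PCCE 기출문제］ 10번 ／ 공원/［PCCE 기출문제］ 10번 ／ 공원.py | solution
-- ===== SOURCE A (Python) =====
-- class mat_in_park():
--     def __init__(self,park):
--         self.park = park
--         self.park_row = len(park)
--         self.park_col = len(park[0])
--         self.mat_size = 0
--
--     def find_mat(self,row,col):
--         for y in range(self.mat_size):
--             for x in range(self.mat_size):
--                 if self.park[row+y][col+x] != '-1':
--                     return False
--         return True
--
--     def park_size(self):
--         for row in range(self.park_row - self.mat_size + 1):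
--             for col in range(self.park_col - self.mat_size + 1):
--                 if self.find_mat(row,col):
--                     return True
--         return False
--
-- def solution(mats, park):
--     p = mat_in_park(park)
--     mats.sort(reverse=True)
--     for mat_size in mats:
--         p.mat_size = mat_size
--         if p.park_size():
--             return mat_size
--     return -1
-- ===== SOURCE B (Python) =====
-- def solution(mats, park):
--     # Maximal-square DP: best = side of the largest all-'-1' square in park,
--     # then the answer is the largest mat size not exceeding best.
--     C = len(park[0])
--     best = 0
--     prev = [0] * C
--     for row in park:
--         cur = []
--         for c in range(C):
--             if row[c] == '-1':
--                 v = 1 if c == 0 else 1 + min(prev[c], cur[-1], prev[c - 1])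
--             else:
--                 v = 0
--             cur.append(v)
--             if v > best:
--                 best = v
--         prev = cur
--     fitting = [m for m in mats if m <= best]
--     return max(fitting) if fitting else -1
-- ===== Notes on version B (the rewrite author's own statement) =====
-- stated objective: faster
-- what changed: Replaces A's try-every-sorted-mat brute force (rescanning every s x s window cell by cell for each mat size) with a single O(R*C) maximal-square dynamic program that computes the largest all-'-1' square side once; the answer is then just the maximum mat not exceeding it, with no sorting and no window scans.
-- outside the precondition, e.g. on solution([1], [['x', '-1'], ['x']]): A returns 1, B raises IndexError; on solution([0], [['-1', '-1'], ['-1']]): A returns 0, B raises IndexError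
import Mathlib
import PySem

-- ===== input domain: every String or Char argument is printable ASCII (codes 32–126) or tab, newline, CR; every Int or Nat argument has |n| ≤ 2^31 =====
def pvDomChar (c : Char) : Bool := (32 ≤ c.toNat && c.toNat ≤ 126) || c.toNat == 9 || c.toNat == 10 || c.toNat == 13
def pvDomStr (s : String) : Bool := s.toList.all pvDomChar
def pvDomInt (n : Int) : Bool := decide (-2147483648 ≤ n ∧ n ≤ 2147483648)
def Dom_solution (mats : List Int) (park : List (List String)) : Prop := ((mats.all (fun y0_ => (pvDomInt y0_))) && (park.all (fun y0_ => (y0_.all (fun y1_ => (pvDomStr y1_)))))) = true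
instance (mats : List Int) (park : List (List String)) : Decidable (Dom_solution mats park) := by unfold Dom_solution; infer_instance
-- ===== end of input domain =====

-- B replaces A's per-mat brute-force window scans by one maximal-square DP pass; note Python A
-- sorts `mats` in place (a side effect B does not reproduce) — the equivalence is about the return value.

-- ===== PORT A =====
def findMat (park : List (List String)) (s row col : Int) : Bool :=
  (PySem.List.pyRange 0 s 1).all fun y =>
    (PySem.List.pyRange 0 s 1).all fun x =>
      PySem.List.pyGetD (PySem.List.pyGetD park (row + y) []) (col + x) "" == "-1"

def parkSize (park : List (List String)) (s : Int) : Bool :=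
  (PySem.List.pyRange 0 (PySem.List.len park - s + 1) 1).any fun row =>
    (PySem.List.pyRange 0 (PySem.List.len (PySem.List.pyGetD park 0 []) - s + 1) 1).any fun col =>
      findMat park s row col

def firstFit (park : List (List String)) : List Int → Int
  | [] => -1
  | m :: rest => if parkSize park m then m else firstFit park rest

def solution (mats : List Int) (park : List (List String)) : Int :=
  firstFit park (PySem.List.sorted mats (fun x => x) true)

-- ===== PORT B =====
def altInner (prev : List Int) (row : List String) (C : Int) (b : Int) : List Int × Int :=
  (PySem.List.pyRange 0 C 1).foldl
    (fun (st : List Int × Int) c =>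
      let v : Int :=
        if PySem.List.pyGetD row c "" == "-1" then
          if c = 0 then 1
          else 1 + min (PySem.List.pyGetD prev c 0)
                   (min (PySem.List.pyGetD st.1 (-1) 0) (PySem.List.pyGetD prev (c - 1) 0))
        else 0
      (st.1 ++ [v], if st.2 < v then v else st.2))
    ([], b)

def solution_alt (mats : List Int) (park : List (List String)) : Int :=
  let C : Int := PySem.List.len (PySem.List.pyGetD park 0 [])
  let st := park.foldl (fun (st : List Int × Int) row => altInner st.1 row C st.2)
      (List.replicate C.toNat (0 : Int), 0)
  let fitting := mats.filter (fun m => decide (m ≤ st.2))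
  match PySem.List.max? fitting (fun x => x) with
  | some v => v
  | none => -1

-- ===== PRECONDITION & SPEC =====
-- Pre_ excludes the empty park, on which Python A raises IndexError, and parks with a row shorter
-- than the first row, on which whether A raises or happens to return depends accidentally on which
-- cells its scan probes (both Pythons index rows up to len(park[0])).
def Pre_solution (mats : List Int) (park : List (List String)) : Prop :=
  park ≠ [] ∧ ∀ row ∈ park, (park.headD []).length ≤ row.length
instance (mats : List Int) (park : List (List String)) : Decidable (Pre_solution mats park) := by
  unfold Pre_solution; infer_instance

def pvWitness_solution : List Int × List (List String) :=
  ([1, 2], [["-1", "-1"], ["-1", "x"]])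

def Spec_solution (mats : List Int) (park : List (List String)) (out : Int) : Prop := out = solution_alt mats park
instance (mats : List Int) (park : List (List String)) (out : Int) : Decidable (Spec_solution mats park out) := by unfold Spec_solution; infer_instance

-- ===== CLAIM (what is proved, stated in full; the proofs are below) =====
def Claim_equal_solution : Prop := ∀ (mats : List Int) (park : List (List String)), Dom_solution mats park → Pre_solution mats park → Spec_solution mats park (solution mats park)

-- ===== LEMMAS AND PROOFS =====

-- the cell test both programs perform, with Nat indices
def cellE (park : List (List String)) (r c : Nat) : Bool :=
  ((park.getD r []).getD c "") == "-1"

-- the maximal-square table B fills: side of the largest all-'-1' square whose bottom-right cell is (r, c)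
def dpN (park : List (List String)) (r c : Nat) : Nat :=
  if cellE park r c then
    if r = 0 ∨ c = 0 then 1
    else 1 + min (dpN park (r - 1) c) (min (dpN park r (c - 1)) (dpN park (r - 1) (c - 1)))
  else 0
termination_by r + c
decreasing_by all_goals omega

theorem dpN_ge_iff (park : List (List String)) (r c s : Nat) :
    s ≤ dpN park r c ↔
      s = 0 ∨ (s ≤ r + 1 ∧ s ≤ c + 1 ∧ ∀ y < s, ∀ x < s, cellE park (r - y) (c - x) = true) := by
  have main : ∀ n, ∀ r c, r + c ≤ n → ∀ s, s ≤ dpN park r c ↔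
      s = 0 ∨ (s ≤ r + 1 ∧ s ≤ c + 1 ∧ ∀ y < s, ∀ x < s, cellE park (r - y) (c - x) = true) := by
    intro n
    induction n using Nat.strong_induction_on with
    | _ n ih =>
      intro r c hrc s
      rw [dpN]
      by_cases hE : cellE park r c = true
      · by_cases h0 : r = 0 ∨ c = 0
        · simp only [hE, if_true, h0]
          constructor
          · intro hs
            interval_cases s
            · exact Or.inl rfl
            · refine Or.inr ⟨by omega, by omega, ?_⟩
              intro y hy x hx
              have : y = 0 := by omega
              have hx0 : x = 0 := by omega
              subst this; subst hx0; simpa using hE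
          · rintro (hs | ⟨h1, h2, _⟩)
            · omega
            · omega
        · -- r ≥ 1 and c ≥ 1
          have hr1 : 1 ≤ r := by omega
          have hc1 : 1 ≤ c := by omega
          simp only [hE, if_true, h0, if_false]
          have ihA := ih (n - 1) (by omega) (r - 1) c (by omega)
          have ihB := ih (n - 1) (by omega) r (c - 1) (by omega)
          have ihC := ih (n - 1) (by omega) (r - 1) (c - 1) (by omega)
          rcases s with _ | t
          · simp
          · have hsplit : t + 1 ≤ 1 + min (dpN park (r - 1) c) (min (dpN park r (c - 1)) (dpN park (r - 1) (c - 1))) ↔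
                t ≤ dpN park (r - 1) c ∧ t ≤ dpN park r (c - 1) ∧ t ≤ dpN park (r - 1) (c - 1) := by
              omega
            rw [hsplit, ihA t, ihB t, ihC t]
            constructor
            · rintro ⟨hA, hB, hC⟩
              rcases Nat.eq_zero_or_pos t with ht0 | ht1
              · subst ht0
                refine Or.inr ⟨by omega, by omega, ?_⟩
                intro y hy x hx
                have hy0 : y = 0 := by omega
                have hx0 : x = 0 := by omega
                subst hy0; subst hx0; simpa using hE
              · rcases hA with hA | ⟨hA1, hA2, hAsq⟩; · omega
                rcases hB with hB | ⟨hB1, hB2, hBsq⟩; · omega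
                rcases hC with hC | ⟨hC1, hC2, hCsq⟩; · omega
                refine Or.inr ⟨by omega, by omega, ?_⟩
                intro y hy x hx
                rcases Nat.eq_zero_or_pos y with hy0 | hy1
                · subst hy0
                  rcases Nat.eq_zero_or_pos x with hx0 | hx1
                  · subst hx0; simpa using hE
                  · have := hBsq 0 (by omega) (x - 1) (by omega)
                    have hidx : c - 1 - (x - 1) = c - x := by omega
                    simpa [hidx] using this
                · by_cases hxt : x < t
                  · have := hAsq (y - 1) (by omega) x (by omega)
                    have hidx : r - 1 - (y - 1) = r - y := by omega
                    simpa [hidx] using this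
                  · have hxeq : x = t := by omega
                    have := hCsq (y - 1) (by omega) (t - 1) (by omega)
                    have hidx1 : r - 1 - (y - 1) = r - y := by omega
                    have hidx2 : c - 1 - (t - 1) = c - t := by omega
                    rw [hidx1, hidx2] at this
                    rw [hxeq]
                    exact this
            · rintro (h | ⟨hb1, hb2, hsq⟩)
              · omega
              · rcases Nat.eq_zero_or_pos t with ht0 | ht1
                · subst ht0; exact ⟨Or.inl rfl, Or.inl rfl, Or.inl rfl⟩
                · refine ⟨Or.inr ⟨by omega, by omega, ?_⟩, Or.inr ⟨by omega, by omega, ?_⟩, Or.inr ⟨by omega, by omega, ?_⟩⟩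
                  · intro y hy x hx
                    have := hsq (y + 1) (by omega) x (by omega)
                    have hidx : r - 1 - y = r - (y + 1) := by omega
                    rw [hidx]; exact this
                  · intro y hy x hx
                    have := hsq y (by omega) (x + 1) (by omega)
                    have hidx : c - 1 - x = c - (x + 1) := by omega
                    rw [hidx]; exact this
                  · intro y hy x hx
                    have := hsq (y + 1) (by omega) (x + 1) (by omega)
                    have hidx1 : r - 1 - y = r - (y + 1) := by omega
                    have hidx2 : c - 1 - x = c - (x + 1) := by omega
                    rw [hidx1, hidx2]; exact this
      · rw [Bool.not_eq_true] at hE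
        simp only [hE, Bool.false_eq_true, if_false]
        constructor
        · intro hs
          left
          omega
        · rintro (hs | ⟨h1, h2, hsq⟩)
          · omega
          · rcases Nat.eq_zero_or_pos s with h | h
            · omega
            · exfalso
              have := hsq 0 (by omega) 0 (by omega)
              simp [hE] at this
  exact main (r + c) r c le_rfl s

-- ===== A-side characterization =====

def dpI (park : List (List String)) (r c : Nat) : Int := (dpN park r c : Int)

theorem findMat_eq (park : List (List String)) (n r c : Nat) :
    findMat park (n : Int) (r : Int) (c : Int) = true ↔
      ∀ y < n, ∀ x < n, cellE park (r + y) (c + x) = true := by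
  unfold findMat
  rw [PySem.List.pyRange_zero_natCast]
  simp only [List.all_map, List.all_eq_true, List.mem_range, Function.comp]
  constructor
  · intro h y hy x hx
    have := h y hy x hx
    simp only [← Nat.cast_add, PySem.List.pyGetD_natCast] at this
    simpa [cellE, List.getD] using this
  · intro h y hy x hx
    have := h y hy x hx
    simp only [← Nat.cast_add, PySem.List.pyGetD_natCast]
    simpa [cellE, List.getD] using this

theorem parkSize_nonpos (park : List (List String)) (s : Int) (hs : s ≤ 0) :
    parkSize park s = true := by
  unfold parkSize
  rw [List.any_eq_true]
  refine ⟨0, ?_, ?_⟩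
  · rw [PySem.List.mem_pyRange_one]
    constructor
    · rfl
    · simp [PySem.List.len_eq]; omega
  · rw [List.any_eq_true]
    refine ⟨0, ?_, ?_⟩
    · rw [PySem.List.mem_pyRange_one]
      constructor
      · rfl
      · simp [PySem.List.len_eq]; omega
    · unfold findMat
      rw [PySem.List.pyRange_one_eq_nil (by omega)]
      simp

theorem parkSize_pos_iff (park : List (List String)) (n : Nat) (_hn : 1 ≤ n) :
    parkSize park (n : Int) = true ↔
      ∃ r, r + n ≤ park.length ∧ ∃ c, c + n ≤ (park.getD 0 []).length ∧
        ∀ y < n, ∀ x < n, cellE park (r + y) (c + x) = true := by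
  unfold parkSize
  simp only [List.any_eq_true, PySem.List.mem_pyRange_one, PySem.List.len_eq,
    PySem.List.pyGetD_zero]
  constructor
  · rintro ⟨row, ⟨hr0, hrlt⟩, col, ⟨hc0, hclt⟩, hfm⟩
    refine ⟨row.toNat, by omega, col.toNat, by omega, ?_⟩
    rw [← (findMat_eq park n row.toNat col.toNat)]
    have h1 : (row.toNat : Int) = row := by omega
    have h2 : (col.toNat : Int) = col := by omega
    rw [h1, h2]
    exact hfm
  · rintro ⟨r, hr, c, hc, hsq⟩
    refine ⟨(r : Int), ⟨by omega, by omega⟩, (c : Int), ⟨by omega, by omega⟩, ?_⟩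
    exact (findMat_eq park n r c).mpr hsq

theorem exists_square_iff_dp (park : List (List String)) (n : Nat) (hn : 1 ≤ n) :
    (∃ r, r + n ≤ park.length ∧ ∃ c, c + n ≤ (park.getD 0 []).length ∧
        ∀ y < n, ∀ x < n, cellE park (r + y) (c + x) = true) ↔
      ∃ r < park.length, ∃ c < (park.getD 0 []).length, n ≤ dpN park r c := by
  constructor
  · rintro ⟨r, hr, c, hc, hsq⟩
    refine ⟨r + n - 1, by omega, c + n - 1, by omega, ?_⟩
    rw [dpN_ge_iff]
    refine Or.inr ⟨by omega, by omega, ?_⟩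
    intro y hy x hx
    have := hsq (n - 1 - y) (by omega) (n - 1 - x) (by omega)
    have h1 : r + n - 1 - y = r + (n - 1 - y) := by omega
    have h2 : c + n - 1 - x = c + (n - 1 - x) := by omega
    rw [h1, h2]
    exact this
  · rintro ⟨r', hr', c', hc', hdp⟩
    rw [dpN_ge_iff] at hdp
    rcases hdp with h | ⟨h1, h2, hsq⟩
    · omega
    · refine ⟨r' + 1 - n, by omega, c' + 1 - n, by omega, ?_⟩
      intro y hy x hx
      have := hsq (n - 1 - y) (by omega) (n - 1 - x) (by omega)
      have hi1 : r' - (n - 1 - y) = r' + 1 - n + y := by omega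
      have hi2 : c' - (n - 1 - x) = c' + 1 - n + x := by omega
      rw [hi1, hi2] at this
      exact this

-- ===== B-side loop invariants =====

def prevList (park : List (List String)) (CN : Nat) (r0 : Nat) : List Int :=
  if r0 = 0 then List.replicate CN 0 else (List.range CN).map (dpI park (r0 - 1))

def rowMax (park : List (List String)) (CN : Nat) (r0 : Nat) (b : Int) : Int :=
  (List.range CN).foldl (fun a c => if a < dpI park r0 c then dpI park r0 c else a) b

def bestAcc (park : List (List String)) (CN : Nat) : Nat → Nat → Int → Int
  | _, 0, b => b
  | r0, k + 1, b => bestAcc park CN (r0 + 1) k (rowMax park CN r0 b)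

theorem prevList_getD (park : List (List String)) (CN r0 c : Nat) (hc : c < CN) :
    (prevList park CN r0).getD c 0 = if r0 = 0 then 0 else dpI park (r0 - 1) c := by
  unfold prevList
  by_cases h : r0 = 0
  · simp [h, List.getD, hc]
  · rw [if_neg h, if_neg h]
    simp [List.getD, hc]

theorem altInner_spec (park : List (List String)) (CN r0 : Nat) (b : Int) :
    altInner (prevList park CN r0) (park.getD r0 []) (CN : Int) b =
      ((List.range CN).map (dpI park r0), rowMax park CN r0 b) := by
  unfold altInner rowMax
  have key : ∀ k, k ≤ CN →
      (PySem.List.pyRange 0 (k : Int) 1).foldl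
        (fun (st : List Int × Int) c =>
          let v : Int :=
            if PySem.List.pyGetD (park.getD r0 []) c "" == "-1" then
              if c = 0 then 1
              else 1 + min (PySem.List.pyGetD (prevList park CN r0) c 0)
                       (min (PySem.List.pyGetD st.1 (-1) 0)
                            (PySem.List.pyGetD (prevList park CN r0) (c - 1) 0))
            else 0
          (st.1 ++ [v], if st.2 < v then v else st.2)) ([], b)
      = ((List.range k).map (dpI park r0),
         (List.range k).foldl (fun a c => if a < dpI park r0 c then dpI park r0 c else a) b) := by
    intro k
    induction k with
    | zero =>
      intro _
      rw [PySem.List.pyRange_one_eq_nil (by omega)]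
      simp
    | succ k ih =>
      intro hk1
      have hk : k < CN := by omega
      have hcast : ((k + 1 : Nat) : Int) = (k : Int) + 1 := by push_cast; ring
      rw [hcast, PySem.List.pyRange_one_succ_right (by omega), List.foldl_append,
        ih (by omega), List.foldl_cons, List.foldl_nil]
      have hv : (if PySem.List.pyGetD (park.getD r0 []) (k : Int) "" == "-1" then
              if (k : Int) = 0 then 1
              else 1 + min (PySem.List.pyGetD (prevList park CN r0) (k : Int) 0)
                       (min (PySem.List.pyGetD ((List.range k).map (dpI park r0)) (-1) 0)
                            (PySem.List.pyGetD (prevList park CN r0) ((k : Int) - 1) 0))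
            else (0 : Int)) = dpI park r0 k := by
        by_cases hc : cellE park r0 k
        · have hb : (PySem.List.pyGetD (park.getD r0 []) (k : Int) "" == "-1") = true := by
            simpa [cellE, List.getD] using hc
          rw [hb, if_pos rfl]
          by_cases hk0 : k = 0
          · subst hk0
            rw [if_pos (by simp)]
            unfold dpI
            rw [dpN]
            simp [hc]
          · rw [if_neg (by exact_mod_cast hk0)]
            have hkm : (k : Int) - 1 = ((k - 1 : Nat) : Int) := by omega
            have hlast : PySem.List.pyGetD ((List.range k).map (dpI park r0)) (-1) 0
                = dpI park r0 (k - 1) := by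
              have hks : k = (k - 1) + 1 := by omega
              conv_lhs => rw [hks, List.range_succ, List.map_append, List.map_cons, List.map_nil]
              rw [PySem.List.pyGetD_neg_one_append_singleton]
            rw [hkm, PySem.List.pyGetD_natCast, PySem.List.pyGetD_natCast,
              prevList_getD park CN r0 k hk, prevList_getD park CN r0 (k - 1) (by omega), hlast]
            unfold dpI
            conv_rhs => rw [dpN]
            rw [if_pos hc]
            by_cases hr0 : r0 = 0
            · subst hr0
              simp
            · rw [if_neg hr0, if_neg (by omega : ¬ (r0 = 0 ∨ k = 0))]
              push_cast
              omega
        · have hb : (PySem.List.pyGetD (park.getD r0 []) (k : Int) "" == "-1") = false := by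
            simpa [cellE, List.getD] using hc
          rw [hb, if_neg (by simp)]
          unfold dpI
          rw [dpN]
          simp [hc]
      simp only []
      rw [List.range_succ, List.map_append, List.map_cons, List.map_nil, List.foldl_append,
        List.foldl_cons, List.foldl_nil]
      exact Prod.ext (by rw [← hv]) (by rw [← hv])
  exact key CN le_rfl

theorem outer_spec (park : List (List String)) (CN : Nat) :
    ∀ (rows : List (List String)) (r0 : Nat) (b : Int), rows = park.drop r0 →
      rows.foldl (fun (st : List Int × Int) row => altInner st.1 row (CN : Int) st.2)
          (prevList park CN r0, b) =
        (prevList park CN (r0 + rows.length), bestAcc park CN r0 rows.length b) := by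
  intro rows
  induction rows with
  | nil =>
    intro r0 b _
    simp [bestAcc]
  | cons row rest ih =>
    intro r0 b hrows
    have hr0lt : r0 < park.length := by
      by_contra h
      rw [List.drop_eq_nil_of_le (by omega)] at hrows
      simp at hrows
    rw [List.drop_eq_getElem_cons hr0lt] at hrows
    obtain ⟨hrow, hrest⟩ := List.cons.inj hrows
    have hrow' : row = park.getD r0 [] := by
      rw [List.getD_eq_getElem park [] hr0lt]
      exact hrow
    simp only [List.foldl_cons]
    rw [hrow', altInner_spec]
    have hpl : (List.range CN).map (dpI park r0) = prevList park CN (r0 + 1) := by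
      unfold prevList
      simp
    rw [hpl, ih (r0 + 1) (rowMax park CN r0 b) hrest]
    have hlen : r0 + 1 + rest.length = r0 + (row :: rest).length := by simp; omega
    rw [hlen]
    rfl

theorem bestAcc_spec (park : List (List String)) (CN : Nat) :
    ∀ (k r0 : Nat) (b : Int),
      b ≤ bestAcc park CN r0 k b ∧
      (∀ r, r0 ≤ r → r < r0 + k → ∀ c < CN, dpI park r c ≤ bestAcc park CN r0 k b) ∧
      (bestAcc park CN r0 k b = b ∨
        ∃ r c, r0 ≤ r ∧ r < r0 + k ∧ c < CN ∧ bestAcc park CN r0 k b = dpI park r c) := by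
  have hrm : ∀ (r0 : Nat) (b : Int),
      b ≤ rowMax park CN r0 b ∧ (∀ c < CN, dpI park r0 c ≤ rowMax park CN r0 b) ∧
      (rowMax park CN r0 b = b ∨ ∃ c < CN, rowMax park CN r0 b = dpI park r0 c) := by
    intro r0 b
    have hstep : ∀ a v : Int, (if a < v then v else a) = max a v := by
      intro a v
      rcases lt_or_ge a v with h | h
      · rw [if_pos h, max_eq_right (le_of_lt h)]
      · rw [if_neg (by omega), max_eq_left h]
    have hfold : rowMax park CN r0 b = ((List.range CN).map (dpI park r0)).foldl max b := by
      unfold rowMax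
      rw [List.foldl_map]
      congr 1
      funext a c
      exact hstep a (dpI park r0 c)
    rw [hfold]
    obtain ⟨h1, h2⟩ := PySem.List.le_foldl_max ((List.range CN).map (dpI park r0)) b
    refine ⟨h1, ?_, ?_⟩
    · intro c hc
      exact h2 _ (List.mem_map_of_mem (by simpa using hc))
    · rcases PySem.List.foldl_max_mem ((List.range CN).map (dpI park r0)) b with h | h
      · exact Or.inl h
      · obtain ⟨c, hc, hceq⟩ := List.mem_map.mp h
        exact Or.inr ⟨c, by simpa using hc, hceq.symm⟩
  intro k
  induction k with
  | zero =>
    intro r0 b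
    exact ⟨le_rfl, by omega, Or.inl rfl⟩
  | succ k ih =>
    intro r0 b
    obtain ⟨hm1, hm2, hm3⟩ := hrm r0 b
    obtain ⟨ih1, ih2, ih3⟩ := ih (r0 + 1) (rowMax park CN r0 b)
    have hba : bestAcc park CN r0 (k + 1) b = bestAcc park CN (r0 + 1) k (rowMax park CN r0 b) := rfl
    rw [hba]
    refine ⟨le_trans hm1 ih1, ?_, ?_⟩
    · intro r hr1 hr2 c hc
      rcases Nat.eq_or_lt_of_le hr1 with h | h
      · subst h
        exact le_trans (hm2 c hc) ih1
      · exact ih2 r (by omega) (by omega) c hc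
    · rcases ih3 with h | ⟨r, c, ha, hb2, hc, heq⟩
      · rw [h]
        rcases hm3 with h' | ⟨c, hc, heq⟩
        · exact Or.inl h'
        · exact Or.inr ⟨r0, c, le_rfl, by omega, hc, heq⟩
      · exact Or.inr ⟨r, c, by omega, by omega, hc, heq⟩

-- ===== assembling the answer =====

theorem parkSize_iff_le_best (park : List (List String)) (best : Int)
    (hnn : 0 ≤ best)
    (hub : ∀ r < park.length, ∀ c < (park.getD 0 []).length, dpI park r c ≤ best)
    (hatt : best = 0 ∨ ∃ r < park.length, ∃ c < (park.getD 0 []).length, best = dpI park r c)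
    (s : Int) : parkSize park s = (decide (s ≤ best)) := by
  by_cases hs : s ≤ 0
  · rw [parkSize_nonpos park s hs]
    symm
    simp only [decide_eq_true_eq]
    omega
  · have hn1 : 1 ≤ s.toNat := by omega
    have hsn : s = (s.toNat : Int) := by omega
    rw [hsn]
    by_cases hb : ((s.toNat : Int)) ≤ best
    · rw [(parkSize_pos_iff park s.toNat hn1).mpr, decide_eq_true hb]
      rw [exists_square_iff_dp park s.toNat hn1]
      have hbne : ¬ best = 0 := by omega
      rcases hatt with h | ⟨r, hr, c, hc, heq⟩
      · omega
      · refine ⟨r, hr, c, hc, ?_⟩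
        have : (s.toNat : Int) ≤ dpI park r c := by rw [← heq]; exact hb
        unfold dpI at this
        exact_mod_cast this
    · rw [decide_eq_false hb]
      rw [← Bool.not_eq_true]
      intro hcontra
      rw [parkSize_pos_iff park s.toNat hn1, exists_square_iff_dp park s.toNat hn1] at hcontra
      obtain ⟨r, hr, c, hc, hdp⟩ := hcontra
      have h1 := hub r hr c hc
      unfold dpI at h1
      omega

def maxOf (l : List Int) : Int :=
  match PySem.List.max? l (fun x => x) with
  | some v => v
  | none => -1

theorem max?_cons_of_le (m : Int) (xs : List Int) (h : ∀ y ∈ xs, y ≤ m) :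
    PySem.List.max? (m :: xs) (fun x => x) = some m := by
  cases hmx : PySem.List.max? (m :: xs) (fun x => x) with
  | none =>
    exact absurd ((PySem.List.max?_eq_none_iff _ _).mp hmx) (List.cons_ne_nil m xs)
  | some v =>
    have hmem := PySem.List.max?_mem hmx
    have hmax := PySem.List.max?_isMax hmx m (List.mem_cons_self)
    have hv : v ≤ m := by
      rcases List.mem_cons.mp hmem with h' | h'
      · omega
      · exact h v h'
    have : v = m := le_antisymm hv hmax
    rw [this]

theorem maxOf_perm (xs ys : List Int) (h : xs.Perm ys) : maxOf xs = maxOf ys := by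
  unfold maxOf
  cases hx : PySem.List.max? xs (fun x => x) with
  | none =>
    have hxnil := (PySem.List.max?_eq_none_iff _ _).mp hx
    subst hxnil
    rw [List.nil_perm] at h
    subst h
    rfl
  | some v =>
    cases hy : PySem.List.max? ys (fun x => x) with
    | none =>
      have hynil := (PySem.List.max?_eq_none_iff _ _).mp hy
      subst hynil
      rw [List.perm_nil] at h
      subst h
      simp [PySem.List.max?] at hx
    | some w =>
      have hvmem := h.mem_iff.mp (PySem.List.max?_mem hx)
      have hwmem := h.mem_iff.mpr (PySem.List.max?_mem hy)
      have h1 : v ≤ w := PySem.List.max?_isMax hy v hvmem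
      have h2 : w ≤ v := PySem.List.max?_isMax hx w hwmem
      simp
      omega

theorem firstFit_eq_maxOf (park : List (List String)) (best : Int)
    (hps : ∀ s : Int, parkSize park s = (decide (s ≤ best))) :
    ∀ (l : List Int), l.Pairwise (fun a b => b ≤ a) →
      firstFit park l = maxOf (l.filter (fun m => decide (m ≤ best))) := by
  intro l
  induction l with
  | nil => intro _; rfl
  | cons m t ih =>
    intro hpw
    obtain ⟨hm, ht⟩ := List.pairwise_cons.mp hpw
    rw [firstFit, hps m]
    by_cases hmb : m ≤ best
    · rw [if_pos (by simpa using hmb)]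
      rw [List.filter_cons_of_pos (by simpa using hmb)]
      unfold maxOf
      rw [max?_cons_of_le m _ (fun y hy => hm y (List.mem_of_mem_filter hy))]
    · rw [if_neg (by simpa using hmb)]
      rw [List.filter_cons_of_neg (by simpa using hmb)]
      exact ih ht

-- ===== VERDICT (by name: the statement is the Claim_ definition above) =====
theorem solution_spec : Claim_equal_solution := by
  intro mats park _ _
  unfold Spec_solution solution solution_alt
  have hC0 : PySem.List.len (PySem.List.pyGetD park 0 []) = ((park.getD 0 []).length : Int) := by
    rw [PySem.List.pyGetD_zero]
    simp [PySem.List.len_eq]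
  rw [hC0]
  simp only [Int.toNat_natCast]
  have hprev0 : List.replicate (park.getD 0 []).length (0 : Int) =
      prevList park (park.getD 0 []).length 0 := by
    unfold prevList
    simp
  have houter := outer_spec park (park.getD 0 []).length park 0 0 (by simp)
  simp only [hprev0, houter]
  obtain ⟨hnn, hub, hatt⟩ := bestAcc_spec park (park.getD 0 []).length park.length 0 0
  have hub' : ∀ r < park.length, ∀ c < (park.getD 0 []).length,
      dpI park r c ≤ bestAcc park (park.getD 0 []).length 0 park.length 0 :=
    fun r hr c hc => hub r (by omega) (by omega) c hc
  have hatt' : bestAcc park (park.getD 0 []).length 0 park.length 0 = 0 ∨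
      ∃ r < park.length, ∃ c < (park.getD 0 []).length,
        bestAcc park (park.getD 0 []).length 0 park.length 0 = dpI park r c := by
    rcases hatt with h | ⟨r, c, h1, h2, h3, h4⟩
    · exact Or.inl h
    · exact Or.inr ⟨r, by omega, c, h3, h4⟩
  have hps := parkSize_iff_le_best park _ hnn hub' hatt'
  have hpw : (PySem.List.sorted mats (fun x => x) true).Pairwise (fun a b => b ≤ a) := by
    have := PySem.List.sorted_pairwise_rev (xs := mats) (key := fun x => x)
    simpa using this
  rw [firstFit_eq_maxOf park _ hps _ hpw]
  rw [maxOf_perm _ _ (List.Perm.filter _ (PySem.List.sorted_perm mats (fun x => x) true))]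
  rfl
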